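-- pv_equiv track=rewrite | github.com/csongph/BA_TOOL_For_multiple_DB | backend/parser/sql_parser.py | _strip_collate
-- ===== SOURCE A (Python) =====
-- def _strip_collate(tokens: list[str]) -> str:
--     result: list[str] = []
--     skip_next: bool = False
--     for token in tokens:
--         clean = token.lower().rstrip(",")
--         if skip_next:
--             skip_next = False
--             continue
--         if clean == "collate":
--             skip_next = True
--             continue
--         result.append(token)
--     return " ".join(result)
-- ===== SOURCE B (Python) =====
-- def _strip_collate(tokens: list[str]) -> str:
--     ts = list(tokens)
--     while True:
--         i = next((k for k, t in enumerate(ts)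
--                   if t.lower().rstrip(",") == "collate"), None)
--         if i is None:
--             return " ".join(ts)
--         ts = ts[:i] + ts[i + 2:]
-- ===== Notes on version B (the rewrite author's own statement) =====
-- stated objective: alternative
-- what changed: Replaces the single left-to-right pass with a skip_next flag by a fixpoint of splices: repeatedly locate the first 'collate' token and delete it together with its successor from the list, until no collate remains; correct because the first collate occurrence is never in a skipped position.
import Mathlib
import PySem

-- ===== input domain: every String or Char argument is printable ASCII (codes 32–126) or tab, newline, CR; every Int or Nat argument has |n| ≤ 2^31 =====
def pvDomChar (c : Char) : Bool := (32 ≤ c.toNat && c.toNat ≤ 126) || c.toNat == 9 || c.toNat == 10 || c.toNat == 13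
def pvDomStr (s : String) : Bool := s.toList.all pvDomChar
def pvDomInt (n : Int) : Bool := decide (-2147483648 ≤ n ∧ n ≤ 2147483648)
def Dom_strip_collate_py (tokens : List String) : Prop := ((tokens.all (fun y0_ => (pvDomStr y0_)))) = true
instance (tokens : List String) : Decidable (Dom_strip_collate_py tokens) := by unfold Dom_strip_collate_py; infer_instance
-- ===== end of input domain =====

-- B replaces A's single pass with a skip_next flag by a fixpoint of splices:
-- repeatedly delete the first 'collate' token together with its successor.

-- `token.lower().rstrip(",") == "collate"` — rstrip(",") drops only trailing ','s
-- (exact: PySem has no right-only char-strip, so it is ported by hand here).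
def pvIsCollate (token : String) : Bool :=
  ((PySem.Str.lower token).toList.reverse.dropWhile (· == ',')).reverse = "collate".toList

-- ===== PORT A =====
-- the for-loop's state: (result, skip_next)
def pvStepA (st : List String × Bool) (token : String) : List String × Bool :=
  if st.2 then (st.1, false)
  else if pvIsCollate token then (st.1, true)
  else (st.1 ++ [token], st.2)

def strip_collate_py (tokens : List String) : String :=
  PySem.Str.join " " (tokens.foldl pvStepA ([], false)).1

-- ===== PORT B =====
-- index of the first 'collate' token (B's enumerate-based generator search)
def pvFindC : List String → Option Nat
  | [] => none
  | t :: ts => if pvIsCollate t then some 0 else (pvFindC ts).map (· + 1)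

-- termination fact the fixpoint loop needs: the found index is in range
theorem pvFindC_lt : ∀ (ts : List String) (i : Nat), pvFindC ts = some i → i < ts.length := by
  intro ts
  induction ts with
  | nil => intro i h; simp [pvFindC] at h
  | cons t ts ih =>
      intro i h
      by_cases hc : pvIsCollate t
      · simp [pvFindC, hc] at h; simp; omega
      · simp [pvFindC, hc] at h
        obtain ⟨j, hj, rfl⟩ := h
        have := ih j hj
        simp; omega

-- B's while loop: splice out ts[i:i+2] at the first collate until none remains
def pvFix (ts : List String) : List String :=
  match h : pvFindC ts with
  | none => ts
  | some i => pvFix (ts.take i ++ ts.drop (i + 2))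
termination_by ts.length
decreasing_by
  have hi := pvFindC_lt ts i h
  simp [List.length_take, List.length_drop]
  omega

def strip_collate_py_alt (tokens : List String) : String :=
  PySem.Str.join " " (pvFix tokens)

-- ===== PRECONDITION & SPEC =====
def Spec_strip_collate_py (tokens : List String) (out : String) : Prop := out = strip_collate_py_alt tokens
instance (tokens : List String) (out : String) : Decidable (Spec_strip_collate_py tokens out) := by unfold Spec_strip_collate_py; infer_instance

-- ===== CLAIM (what is proved, stated in full; the proofs are below) =====
def Claim_equal_strip_collate_py : Prop := ∀ (tokens : List String), Dom_strip_collate_py tokens → Spec_strip_collate_py tokens (strip_collate_py tokens)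

-- ===== LEMMAS AND PROOFS =====

-- no collate in ts → A's fold just appends everything
theorem foldA_none : ∀ (ts : List String), pvFindC ts = none →
    ∀ acc : List String, (ts.foldl pvStepA (acc, false)).1 = acc ++ ts := by
  intro ts
  induction ts with
  | nil => intro _ acc; simp
  | cons t ts ih =>
      intro h acc
      by_cases hc : pvIsCollate t
      · simp [pvFindC, hc] at h
      · simp [pvFindC, hc] at h
        have e : pvStepA (acc, false) t = (acc ++ [t], false) := by
          simp [pvStepA, hc]
        rw [List.foldl_cons, e, ih h (acc ++ [t])]
        simp

-- splicing out the first collate pair does not change A's fold result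
theorem foldA_splice : ∀ (ts : List String) (i : Nat) (acc : List String),
    pvFindC ts = some i →
    (ts.foldl pvStepA (acc, false)).1
      = ((ts.take i ++ ts.drop (i + 2)).foldl pvStepA (acc, false)).1 := by
  intro ts
  induction ts with
  | nil => intro i acc h; simp [pvFindC] at h
  | cons t ts ih =>
      intro i acc h
      by_cases hc : pvIsCollate t
      · simp [pvFindC, hc] at h
        subst h
        have e : pvStepA (acc, false) t = (acc, true) := by simp [pvStepA, hc]
        cases ts with
        | nil => simp [pvStepA, hc]
        | cons u rs =>
            have e2 : pvStepA (acc, true) u = (acc, false) := by simp [pvStepA]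
            simp only [List.take_zero, List.nil_append, List.foldl_cons, e, e2]
            rfl
      · simp [pvFindC, hc] at h
        obtain ⟨j, hj, rfl⟩ := h
        have e : pvStepA (acc, false) t = (acc ++ [t], false) := by
          simp [pvStepA, hc]
        have hd : (t :: ts).drop (j + 1 + 2) = ts.drop (j + 2) := by simp
        simp only [List.foldl_cons, e, List.take_succ_cons, List.cons_append, hd]
        exact ih j (acc ++ [t]) hj

-- A's fold computes B's fixpoint
theorem foldA_eq_pvFix : ∀ (ts : List String),
    (ts.foldl pvStepA ([], false)).1 = pvFix ts := by
  intro ts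
  induction ts using pvFix.induct with
  | case1 ts h => rw [pvFix, h, foldA_none ts h]; simp
  | case2 ts i h ih =>
      rw [pvFix, h, foldA_splice ts i [] h]
      exact ih

-- ===== VERDICT (by name: the statement is the Claim_ definition above) =====
theorem strip_collate_py_spec : Claim_equal_strip_collate_py := by
  intro tokens _
  unfold Spec_strip_collate_py strip_collate_py strip_collate_py_alt
  rw [foldA_eq_pvFix tokens]
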